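-- pv_equiv track=rewrite | github.com/RUSLANBALTABAEV/Programming_tasks-Abramov---Programming-tasks- | CHAPTER_1-BASIC_PROGRAMMING_TECHNIQUES/The simplest loops/87.py | sum_last_digits
-- ===== SOURCE A (Python) =====
-- def sum_last_digits(n, m):
--     """Возвращает сумму m последних цифр числа n"""
--     s = 0
--     count = 0
--
--     while n > 0 and count < m:
--         s += n % 10      # последняя цифра
--         n //= 10         # убираем последнюю цифру
--         count += 1
--
--     return s
-- ===== SOURCE B (Python) =====
-- def sum_last_digits(n, m):
--     """Возвращает сумму m последних цифр числа n"""
--     if n <= 0 or m <= 0: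
--         return 0
--     return sum(int(d) for d in str(n)[-m:])
-- ===== Notes on version B (the rewrite author's own statement) =====
-- stated objective: idiomatic
-- what changed: Replaces the explicit modulo/division digit-peeling while-loop with a guard plus summing the int values of the last m characters of the decimal string (str(n)[-m:]).
import Mathlib
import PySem

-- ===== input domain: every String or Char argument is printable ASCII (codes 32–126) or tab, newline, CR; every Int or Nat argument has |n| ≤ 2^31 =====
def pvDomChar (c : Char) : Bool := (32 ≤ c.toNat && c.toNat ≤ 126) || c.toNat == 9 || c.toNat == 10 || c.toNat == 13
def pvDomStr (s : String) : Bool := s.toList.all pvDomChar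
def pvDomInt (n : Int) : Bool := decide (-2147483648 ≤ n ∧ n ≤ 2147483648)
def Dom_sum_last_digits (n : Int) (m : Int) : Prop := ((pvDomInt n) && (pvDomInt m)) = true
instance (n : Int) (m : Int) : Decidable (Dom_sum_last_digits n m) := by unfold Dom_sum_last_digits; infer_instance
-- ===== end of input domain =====

-- B replaces A's modulo/division peeling loop by summing the digit characters of the
-- decimal string's last-m slice (objective: idiomatic; same cost, no speed claim).

-- ===== PORT A =====
-- the while loop of A: state (n, s, count); termination: n // 10 < n when n > 0
def pvLoopA (n m s count : Int) : Int :=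
  if h : 0 < n ∧ count < m then
    pvLoopA (PySem.Int.floordiv n 10) m (s + PySem.Int.mod n 10) (count + 1)
  else s
termination_by n.toNat
decreasing_by
  have hd : PySem.Int.floordiv n 10 = n / 10 :=
    PySem.Int.floordiv_eq_ediv_of_pos (by norm_num)
  rw [hd]; omega

def sum_last_digits (n : Int) (m : Int) : Int := pvLoopA n m 0 0

-- ===== PORT B =====
-- str(n)[-m:] ported via PySem.Int.toChars and PySem.List.slice; int(d) via
-- PySem.Int.ofChars? [d] (exact here: every sliced character is a digit, so the
-- .getD 0 default is never reached)
def sum_last_digits_alt (n : Int) (m : Int) : Int :=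
  if n ≤ 0 ∨ m ≤ 0 then 0
  else (((PySem.List.slice (PySem.Int.toChars n) (some (-m)) none)).map
          (fun c => (PySem.Int.ofChars? [c]).getD 0)).sum

-- ===== PRECONDITION & SPEC =====
def Spec_sum_last_digits (n : Int) (m : Int) (out : Int) : Prop := out = sum_last_digits_alt n m
instance (n : Int) (m : Int) (out : Int) : Decidable (Spec_sum_last_digits n m out) := by unfold Spec_sum_last_digits; infer_instance

-- ===== CLAIM (what is proved, stated in full; the proofs are below) =====
def Claim_equal_sum_last_digits : Prop := ∀ (n : Int) (m : Int), Dom_sum_last_digits n m → Spec_sum_last_digits n m (sum_last_digits n m)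

-- ===== LEMMAS AND PROOFS =====

-- A's loop sums the first (m - count) little-endian decimal digits of n
lemma pvLoopA_eq (n m s count : Int) :
    pvLoopA n m s count =
      s + (((Nat.digits 10 n.toNat).take (m - count).toNat).map Int.ofNat).sum := by
  by_cases h : 0 < n ∧ count < m
  · rw [pvLoopA, dif_pos h]
    have hd : PySem.Int.floordiv n 10 = n / 10 :=
      PySem.Int.floordiv_eq_ediv_of_pos (by norm_num)
    have hm : PySem.Int.mod n 10 = n % 10 :=
      PySem.Int.mod_eq_emod_of_pos (by norm_num)
    have ih := pvLoopA_eq (PySem.Int.floordiv n 10) m (s + PySem.Int.mod n 10) (count + 1)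
    rw [ih, hd, hm]
    have hpos : 0 < n.toNat := by omega
    have hdig : Nat.digits 10 n.toNat = n.toNat % 10 :: Nat.digits 10 (n.toNat / 10) :=
      Nat.digits_def' (by norm_num) hpos
    have h1 : (n / 10).toNat = n.toNat / 10 := by omega
    have h2 : n % 10 = ((n.toNat % 10 : Nat) : Int) := by omega
    have h3 : (m - count).toNat = ((m - (count + 1)).toNat) + 1 := by omega
    rw [h1, hdig, h3, List.take_succ_cons, List.map_cons, List.sum_cons, h2]
    simp only [Int.ofNat_eq_natCast]
    ring
  · rw [pvLoopA, dif_neg h]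
    rcases not_and_or.mp h with hn | hc
    · have : n.toNat = 0 := by omega
      simp [this]
    · have : (m - count).toNat = 0 := by omega
      simp [this]

termination_by n.toNat
decreasing_by
  have hd : PySem.Int.floordiv n 10 = n / 10 :=
    PySem.Int.floordiv_eq_ediv_of_pos (by norm_num)
  rw [hd]; omega

-- Nat.toDigits is the big-endian digit-character list (positive case)
lemma toDigitsCore_eq (f : Nat) : ∀ (k : Nat) (acc : List Char), 0 < k → k < f →
    Nat.toDigitsCore 10 f k acc = ((Nat.digits 10 k).map Nat.digitChar).reverse ++ acc := by
  induction f with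
  | zero => intro k acc hk hf; omega
  | succ f ih =>
    intro k acc hk hf
    have hdig : Nat.digits 10 k = k % 10 :: Nat.digits 10 (k / 10) :=
      Nat.digits_def' (by norm_num) hk
    rw [Nat.toDigitsCore]
    by_cases hz : k / 10 = 0
    · have : Nat.digits 10 (k / 10) = [] := by rw [hz]; simp
      simp [hz, hdig]
    · have hlt : k / 10 < f := by omega
      rw [if_neg hz, ih (k / 10) _ (by omega) hlt, hdig]
      simp

lemma toDigits_eq (k : Nat) (hk : 0 < k) :
    Nat.toDigits 10 k = ((Nat.digits 10 k).map Nat.digitChar).reverse := by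
  rw [Nat.toDigits]
  have := toDigitsCore_eq (k + 1) k [] hk (by omega)
  simpa using this

-- int(<digit char>) recovers the digit
lemma ofChars_digitChar (d : Nat) (hd : d < 10) :
    (PySem.Int.ofChars? [Nat.digitChar d]).getD 0 = (d : Int) := by
  interval_cases d <;> decide

-- every digit produced by Nat.digits 10 is < 10
lemma digit_lt_ten {k d : Nat} (h : d ∈ Nat.digits 10 k) : d < 10 :=
  Nat.digits_lt_base (by norm_num) h

theorem pv_main (n m : Int) : sum_last_digits n m = sum_last_digits_alt n m := by
  unfold sum_last_digits sum_last_digits_alt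
  rw [pvLoopA_eq]
  by_cases h : n ≤ 0 ∨ m ≤ 0
  · rw [if_pos h]
    rcases h with hn | hm
    · have : n.toNat = 0 := by omega
      simp [this]
    · have hm' : m.toNat = 0 := by omega
      simp [hm']
  · rw [if_neg h]
    push Not at h
    obtain ⟨hn, hm⟩ := h
    -- str(n) for n > 0
    have htc : PySem.Int.toChars n = ((Nat.digits 10 n.toNat).map Nat.digitChar).reverse := by
      rw [PySem.Int.toChars, if_neg (by omega), toDigits_eq n.toNat (by omega)]
    -- the slice xs[-m:] = drop (len - m.toNat)
    have hmk : -((m.toNat : Int)) = -m := by rw [Int.toNat_of_nonneg hm.le]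
    have hslice : PySem.List.slice (PySem.Int.toChars n) (some (-m)) none =
        (PySem.Int.toChars n).drop ((PySem.Int.toChars n).length - m.toNat) := by
      rw [← hmk]; exact PySem.List.slice_from_neg_natCast _ m.toNat (by omega)
    rw [hslice, htc]
    set ds := Nat.digits 10 n.toNat with hds
    have hlen : (((ds.map Nat.digitChar)).reverse).length = (ds.map Nat.digitChar).length := by
      simp
    rw [hlen]
    -- reverse-drop = take-reverse
    have hrd : ((ds.map Nat.digitChar).reverse).drop ((ds.map Nat.digitChar).length - m.toNat) =
        ((ds.map Nat.digitChar).take m.toNat).reverse := by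
      rw [List.reverse_take]
    rw [hrd, List.map_reverse, List.sum_reverse, ← List.map_take, List.map_map]
    have hm0 : (m - 0).toNat = m.toNat := by omega
    rw [hm0, zero_add]
    apply congrArg List.sum
    apply List.map_congr_left
    intro d hdmem
    have hd10 : d < 10 := digit_lt_ten (List.mem_of_mem_take hdmem)
    simpa using (ofChars_digitChar d hd10).symm

-- ===== VERDICT (by name: the statement is the Claim_ definition above) =====
theorem sum_last_digits_spec : Claim_equal_sum_last_digits := by
  intro n m _
  unfold Spec_sum_last_digits
  exact pv_main n m
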